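-- pv_equiv track=rewrite | github.com/pewapplepie/Qunat_Interview_Algo | parallaxVolAdvisor/covertable.py | solution
-- ===== SOURCE A (Python) =====
-- def solution(A):
--     # deal with edge cases
--     if len(A) == 0:
--         return 0
--     if len(A) == 1:
--         return 1
--     # sort the list
--     A.sort()
--     # split the holes into two groups
--     # so that in each group the difference between the largest and smallest hole is minimized
--     diff = A[-1] - A[0]
--     for i in range(len(A) - 1):
--         diff = min(diff, max(A[i] - A[0], A[-1] - A[i + 1]))
--
--     return diff
-- ===== SOURCE B (Python) =====
-- def solution(A):
--     # Same return value as A; also sorts A in place like A does.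
--     if len(A) == 0:
--         return 0
--     if len(A) == 1:
--         return 1
--     A.sort()
--     lo, hi = A[0], A[-1]
--     # g(i) = max range after splitting between index i and i+1 (i in [0, n-2]).
--     # g's first component A[i]-lo is nondecreasing, its second hi-A[i+1] is
--     # nonincreasing, so g is valley-shaped: binary-search the crossover point
--     # (smallest i with A[i]-lo >= hi-A[i+1]; it exists since i = n-2 qualifies)
--     # and take the better of g at the crossover and just before it.
--     left, right = 0, len(A) - 2
--     while left < right:
--         mid = (left + right) // 2
--         if A[mid] - lo >= hi - A[mid + 1]:
--             right = mid
--         else: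
--             left = mid + 1
--     best = max(A[left] - lo, hi - A[left + 1])
--     if left > 0:
--         best = min(best, hi - A[left])
--     return best
-- ===== Notes on version B (the rewrite author's own statement) =====
-- stated objective: faster
-- what changed: B replaces A's linear scan over all split points with an O(log n) binary search for the crossover where the increasing prefix-range overtakes the decreasing suffix-range, evaluating the valley-shaped cost only at that point and just before it.
import Mathlib
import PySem

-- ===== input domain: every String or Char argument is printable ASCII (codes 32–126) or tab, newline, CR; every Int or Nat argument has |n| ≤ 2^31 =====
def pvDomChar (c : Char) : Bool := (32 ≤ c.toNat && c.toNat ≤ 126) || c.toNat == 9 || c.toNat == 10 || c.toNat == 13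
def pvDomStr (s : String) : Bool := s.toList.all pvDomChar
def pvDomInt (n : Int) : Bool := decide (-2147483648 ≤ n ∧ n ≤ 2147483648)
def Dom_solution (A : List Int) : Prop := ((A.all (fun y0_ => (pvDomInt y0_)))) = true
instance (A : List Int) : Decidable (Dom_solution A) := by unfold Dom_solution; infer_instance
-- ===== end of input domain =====

-- B replaces A's linear scan over all split points by a binary search for the crossover of the
-- valley-shaped cost; same return value (A sorts its argument in place — the equivalence proved
-- here is about the return value only; B performs the same in-place sort).

-- ===== PORT A =====
-- literal transliteration of A: guards, in-place sort, then the range(len(A)-1) min/max scan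
def solution (A : List Int) : Int :=
  if A.length = 0 then 0
  else if A.length = 1 then 1
  else
    let S := PySem.List.sorted A (fun x => x)
    let diff := PySem.List.pyGetD S (-1) 0 - PySem.List.pyGetD S 0 0
    (PySem.List.pyRange 0 (PySem.List.len S - 1) 1).foldl
      (fun diff i =>
        min diff (max (PySem.List.pyGetD S i 0 - PySem.List.pyGetD S 0 0)
                      (PySem.List.pyGetD S (-1) 0 - PySem.List.pyGetD S (i + 1) 0))) diff

-- ===== PORT B =====
-- the 'while left < right' loop of Source B, step for step (indices are in-range Nats, so List.getD
-- is exact for the Python indexing; (left+right)//2 on nonnegative ints is Nat division; the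
-- fuel argument only makes the loop total — it never runs out, since right - left shrinks)
def bsLoop (S : List Int) (lo hi : Int) (fuel left right : Nat) : Nat :=
  match fuel with
  | 0 => left
  | fuel + 1 =>
    if left < right then
      let mid := (left + right) / 2
      if hi - S.getD (mid + 1) 0 ≤ S.getD mid 0 - lo then
        bsLoop S lo hi fuel left mid
      else
        bsLoop S lo hi fuel (mid + 1) right
    else left

def solution_alt (A : List Int) : Int :=
  if A.length = 0 then 0
  else if A.length = 1 then 1
  else
    let S := PySem.List.sorted A (fun x => x)
    let lo := PySem.List.pyGetD S 0 0
    let hi := PySem.List.pyGetD S (-1) 0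
    let left := bsLoop S lo hi S.length 0 (S.length - 2)
    let best := max (S.getD left 0 - lo) (hi - S.getD (left + 1) 0)
    if 0 < left then min best (hi - S.getD left 0) else best

-- ===== PRECONDITION & SPEC =====
def Spec_solution (A : List Int) (out : Int) : Prop := out = solution_alt A
instance (A : List Int) (out : Int) : Decidable (Spec_solution A out) := by unfold Spec_solution; infer_instance

-- ===== CLAIM (what is proved, stated in full; the proofs are below) =====
def Claim_equal_solution : Prop := ∀ (A : List Int), Dom_solution A → Spec_solution A (solution A)

-- ===== LEMMAS AND PROOFS =====

-- monotonicity of the sorted list read through getD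
lemma getD_sorted_mono (A : List Int) {i j : Nat} (hij : i ≤ j)
    (hj : j < (PySem.List.sorted A (fun x => x)).length) :
    (PySem.List.sorted A (fun x => x)).getD i 0 ≤ (PySem.List.sorted A (fun x => x)).getD j 0 := by
  rw [List.getD_eq_getElem _ _ (lt_of_le_of_lt hij hj), List.getD_eq_getElem _ _ hj]
  exact PySem.List.sorted_id_getElem_mono A hij hj

-- the running-min fold is a lower bound of the seed and of every g i, i < m
lemma foldl_min_le_all (g : Nat → Int) (d : Int) (m : Nat) :
    (List.range m).foldl (fun d i => min d (g i)) d ≤ d ∧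
    ∀ i < m, (List.range m).foldl (fun d i => min d (g i)) d ≤ g i := by
  induction m generalizing d with
  | zero => simp
  | succ m ih =>
    rw [List.range_succ, List.foldl_append]
    refine ⟨le_trans (min_le_left _ _) ((ih d).1), ?_⟩
    intro i hi
    rcases Nat.lt_succ_iff_lt_or_eq.mp hi with h | h
    · exact le_trans (min_le_left _ _) ((ih d).2 i h)
    · subst h; exact min_le_right _ _
-- the running-min fold returns the seed or some g i, i < m
lemma foldl_min_mem (g : Nat → Int) (d : Int) (m : Nat) :
    (List.range m).foldl (fun d i => min d (g i)) d = d ∨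
    ∃ i < m, (List.range m).foldl (fun d i => min d (g i)) d = g i := by
  induction m generalizing d with
  | zero => simp
  | succ m ih =>
    rw [List.range_succ, List.foldl_append]
    simp only [List.foldl_cons, List.foldl_nil]
    rcases min_cases ((List.range m).foldl (fun d i => min d (g i)) d) (g m) with ⟨he, _⟩ | ⟨he, _⟩
    · rw [he]
      rcases ih d with h | ⟨i, hi, h⟩
      · exact Or.inl h
      · exact Or.inr ⟨i, Nat.lt_succ_of_lt hi, h⟩
    · rw [he]
      exact Or.inr ⟨m, Nat.lt_succ_self m, rfl⟩

-- bsLoop finds the least index satisfying the (monotone) crossover predicate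
lemma bsLoop_spec (S : List Int) (lo hi : Int) (N : Nat)
    (hmono : ∀ i j : Nat, i ≤ j → j ≤ N →
      (hi - S.getD (i + 1) 0 ≤ S.getD i 0 - lo) → (hi - S.getD (j + 1) 0 ≤ S.getD j 0 - lo)) :
    ∀ (k l r : Nat), r - l ≤ k → l ≤ r → r ≤ N →
      (∀ j < l, ¬ (hi - S.getD (j + 1) 0 ≤ S.getD j 0 - lo)) →
      (hi - S.getD (r + 1) 0 ≤ S.getD r 0 - lo) →
      l ≤ bsLoop S lo hi k l r ∧ bsLoop S lo hi k l r ≤ r ∧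
      (hi - S.getD (bsLoop S lo hi k l r + 1) 0 ≤ S.getD (bsLoop S lo hi k l r) 0 - lo) ∧
      (∀ j < bsLoop S lo hi k l r, ¬ (hi - S.getD (j + 1) 0 ≤ S.getD j 0 - lo)) := by
  intro k
  induction k with
  | zero =>
    intro l r hk hle hN hb hr
    have hlr : l = r := by omega
    subst hlr
    exact ⟨le_refl _, le_refl _, hr, hb⟩
  | succ k ih =>
    intro l r hk hle hN hb hr
    by_cases hlr : l < r
    · rw [bsLoop]
      simp only [if_pos hlr]
      by_cases hc : hi - S.getD ((l + r) / 2 + 1) 0 ≤ S.getD ((l + r) / 2) 0 - lo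
      · simp only [if_pos hc]
        obtain ⟨h1, h2, h3, h4⟩ := ih l ((l + r) / 2) (by omega) (by omega) (by omega) hb hc
        exact ⟨h1, by omega, h3, h4⟩
      · simp only [if_neg hc]
        have hb' : ∀ j < (l + r) / 2 + 1, ¬ (hi - S.getD (j + 1) 0 ≤ S.getD j 0 - lo) := by
          intro j hj
          rcases Nat.lt_or_ge j l with h | h
          · exact hb j h
          · intro hPj
            exact hc (hmono j ((l + r) / 2) (by omega) (by omega) hPj)
        obtain ⟨h1, h2, h3, h4⟩ := ih ((l + r) / 2 + 1) r (by omega) (by omega) hN hb' hr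
        exact ⟨by omega, h2, h3, h4⟩
    · rw [bsLoop]
      simp only [if_neg hlr]
      have : l = r := by omega
      subst this
      exact ⟨le_refl _, le_refl _, hr, hb⟩

-- the core equality on the sorted list, with everything expressed through getD
lemma core_eq (A : List Int) (h2 : 2 ≤ A.length) :
    solution A = solution_alt A := by
  set S := PySem.List.sorted A (fun x => x) with hS
  have hlen : S.length = A.length := (PySem.List.sorted_perm A (fun x => x) false).length_eq
  set n := S.length with hn
  have hn2 : 2 ≤ n := by omega
  set s : Nat → Int := fun i => S.getD i 0 with hs
  have hSne : S ≠ [] := by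
    intro h; rw [h] at hn; simp at hn; omega
  have hlast : PySem.List.pyGetD S (-1) 0 = s (n - 1) := by
    show PySem.List.pyGetD S (-1) 0 = S.getD (n - 1) 0
    rw [PySem.List.pyGetD_neg_one S 0 hSne, List.getLast_eq_getElem,
        List.getD_eq_getElem _ _ (by omega)]
  have hzero : PySem.List.pyGetD S 0 0 = s 0 := by
    show PySem.List.pyGetD S 0 0 = S.getD 0 0
    rw [show (0 : Int) = ((0 : Nat) : Int) by simp, PySem.List.pyGetD_natCast]
  set lo := s 0 with hlo
  set hi := s (n - 1) with hhi
  have mono : ∀ {i j : Nat}, i ≤ j → j < n → s i ≤ s j := by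
    intro i j hij hj
    exact getD_sorted_mono A hij (by omega)
  set g : Nat → Int := fun i => max (s i - lo) (hi - s (i + 1)) with hg
  -- A's side reduces to a fold over List.range (n-1)
  have hA : solution A =
      (List.range (n - 1)).foldl (fun d i => min d (g i)) (hi - lo) := by
    rw [solution, if_neg (by omega), if_neg (by omega), ← hS]
    simp only [hlast, hzero, PySem.List.len_eq, PySem.List.pyRange_one, ← hn]
    rw [show ((n : Int) - 1 - 0).toNat = n - 1 by omega, List.foldl_map]
    refine PySem.List.foldl_congr_mem _ _ _ _ ?_
    intro acc k _
    have hk1 : ((0 : Int) + (k : Int) + 1) = (((k + 1 : Nat)) : Int) := by omega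
    have hk0 : ((0 : Int) + (k : Int)) = ((k : Nat) : Int) := by omega
    rw [hk1, hk0, PySem.List.pyGetD_natCast, PySem.List.pyGetD_natCast]
  -- B's side: name the binary-search result
  set L := bsLoop S lo hi n 0 (n - 2) with hL
  have hB : solution_alt A = if 0 < L then min (g L) (hi - s L) else g L := by
    rw [solution_alt, if_neg (by omega), if_neg (by omega), ← hS]
    simp only [hlast, hzero]
    rfl
  -- bsLoop's specification at l = 0, r = n - 2
  have hPn2 : hi - S.getD (n - 2 + 1) 0 ≤ S.getD (n - 2) 0 - lo := by
    have h1 : lo ≤ s (n - 2) := mono (by omega) (by omega)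
    have h2 : S.getD (n - 2 + 1) 0 = hi := by
      show S.getD (n - 2 + 1) 0 = S.getD (n - 1) 0
      congr 1; omega
    have h1' : lo ≤ S.getD (n - 2) 0 := h1
    rw [h2]; omega
  have hPmono : ∀ i j : Nat, i ≤ j → j ≤ n - 2 →
      (hi - S.getD (i + 1) 0 ≤ S.getD i 0 - lo) → (hi - S.getD (j + 1) 0 ≤ S.getD j 0 - lo) := by
    intro i j hij hjN hPi
    have h1 : s i ≤ s j := mono hij (by omega)
    have h2 : s (i + 1) ≤ s (j + 1) := mono (by omega) (by omega)
    have h1' : S.getD i 0 ≤ S.getD j 0 := h1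
    have h2' : S.getD (i + 1) 0 ≤ S.getD (j + 1) 0 := h2
    omega
  obtain ⟨-, hLr, hPL, hbelow⟩ :=
    bsLoop_spec S lo hi (n - 2) hPmono n 0 (n - 2) (by omega) (by omega) (by omega) (by simp) hPn2
  rw [← hL] at hLr hPL hbelow
  have hLn1 : L < n - 1 := by omega
  -- P L means g L is its first component; ¬P i means g i is its second
  have hgL : g L = s L - lo := by
    rw [hg]; exact max_eq_left hPL
  have hgi : ∀ i < L, g i = hi - s (i + 1) := by
    intro i hi'
    have h := hbelow i hi'
    have h' : s i - lo < hi - s (i + 1) := by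
      have h1 : ¬ (hi - s (i + 1) ≤ s i - lo) := h
      omega
    rw [hg]; exact max_eq_right (le_of_lt h')
  -- the two sides agree
  obtain ⟨hRd, hRle⟩ := foldl_min_le_all g (hi - lo) (n - 1)
  rw [hA, hB]
  set R := (List.range (n - 1)).foldl (fun d i => min d (g i)) (hi - lo) with hR
  have hBleR : (if 0 < L then min (g L) (hi - s L) else g L) ≤ R := by
    rcases foldl_min_mem g (hi - lo) (n - 1) with hmem | ⟨i, hin, hmem⟩
    · -- R is the seed hi - lo; the if-value is ≤ g L ≤ hi - lo
      have h1 : s L - lo ≤ hi - lo := by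
        have := mono (i := L) (j := n - 1) (by omega) (by omega); omega
      rw [← hR] at hmem
      rw [hmem]
      split
      · exact le_trans (min_le_left _ _) (by rw [hgL]; exact h1)
      · rw [hgL]; exact h1
    · rw [← hR] at hmem
      rw [hmem]
      rcases Nat.lt_or_ge i L with hiL | hiL
      · -- i < L: the second branch dominates and is antitone
        have h0L : 0 < L := by omega
        rw [if_pos h0L, hgi i hiL]
        refine le_trans (min_le_right _ _) ?_
        have := mono (i := i + 1) (j := L) (by omega) (by omega); omega
      · -- L ≤ i: g L = s L - lo ≤ s i - lo ≤ g i
        have h1 : s L ≤ s i := mono hiL (by omega)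
        have h2 : s i - lo ≤ g i := by rw [hg]; exact le_max_left _ _
        have h3 : g L ≤ g i := by rw [hgL]; omega
        split
        · exact le_trans (min_le_left _ _) h3
        · exact h3
  have hRleB : R ≤ (if 0 < L then min (g L) (hi - s L) else g L) := by
    have h1 : R ≤ g L := hRle L hLn1
    split
    · rename_i h0L
      refine le_min h1 ?_
      have h := hRle (L - 1) (by omega)
      rwa [hgi (L - 1) (by omega), show L - 1 + 1 = L by omega] at h
    · exact h1
  omega

-- ===== VERDICT (by name: the statement is the Claim_ definition above) =====
theorem solution_spec : Claim_equal_solution := by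
  intro A _
  unfold Spec_solution
  rcases Nat.lt_or_ge A.length 2 with h | h
  · interval_cases h' : A.length <;> simp [solution, solution_alt, h']
  · exact core_eq A h
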